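-- pv_equiv track=rewrite | github.com/wbopan/flashtrace | ft_ifr_improve.py | _split_span_equal
-- ===== SOURCE A (Python) =====
-- from typing import Any, Dict, List, Optional, Sequence, Tuple
--
-- def _split_span_equal(start: int, end: int, num_segments: int) -> List[Tuple[int, int]]:
--     """Split an inclusive span [start, end] into up to num_segments equal-size segments."""
--     start_i = int(start)
--     end_i = int(end)
--     if end_i < start_i:
--         return []
--
--     length = end_i - start_i + 1
--     n = max(1, int(num_segments))
--     base = length // n
--     rem = length % n
--
--     segments: List[Tuple[int, int]] = []
--     cur = start_i
--     for i in range(n):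
--         seg_len = base + (1 if i < rem else 0)
--         if seg_len <= 0:
--             continue
--         seg_start = cur
--         seg_end = cur + seg_len - 1
--         segments.append((seg_start, seg_end))
--         cur = seg_end + 1
--     return segments
-- ===== SOURCE B (Python) =====
-- from typing import List, Tuple
--
-- def _split_span_equal(start: int, end: int, num_segments: int) -> List[Tuple[int, int]]:
--     """Split an inclusive span [start, end] into up to num_segments equal-size segments."""
--     start_i = int(start)
--     end_i = int(end)
--     if end_i < start_i:
--         return []
--     length = end_i - start_i + 1
--     n = max(1, int(num_segments))
--     base, rem = divmod(length, n)
--     m = min(n, length)  # number of non-empty segments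
--
--     def cut(i: int) -> int:
--         return start_i + i * base + min(i, rem)
--
--     return [(cut(i), cut(i + 1) - 1) for i in range(m)]
-- ===== Notes on version B (the rewrite author's own statement) =====
-- stated objective: alternative
-- what changed: Replaces the running-cursor loop over all n range indices (with a skip branch for empty segments) by closed-form cut points start+i*base+min(i,rem) paired over exactly the min(n,length) non-empty segments.
import Mathlib
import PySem

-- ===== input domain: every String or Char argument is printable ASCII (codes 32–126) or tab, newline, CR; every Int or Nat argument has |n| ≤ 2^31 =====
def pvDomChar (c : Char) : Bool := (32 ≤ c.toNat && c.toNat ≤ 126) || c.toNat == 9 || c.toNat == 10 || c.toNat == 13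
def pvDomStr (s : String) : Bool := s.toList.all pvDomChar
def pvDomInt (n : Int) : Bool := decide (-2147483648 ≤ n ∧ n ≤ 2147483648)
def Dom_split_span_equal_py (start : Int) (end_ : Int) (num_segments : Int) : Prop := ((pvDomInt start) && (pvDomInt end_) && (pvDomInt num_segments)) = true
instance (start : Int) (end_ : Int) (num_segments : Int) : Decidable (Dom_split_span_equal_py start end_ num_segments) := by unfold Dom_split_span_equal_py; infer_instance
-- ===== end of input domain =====

-- B replaces the running-cursor loop by closed-form cut points start+i*base+min(i,rem)
-- and iterates only over the min(n,length) non-empty segments (objective: alternative).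

-- ===== PORT A =====
def split_span_equal_py (start : Int) (end_ : Int) (num_segments : Int) : List (Int × Int) :=
  if end_ < start then []
  else
    let length := end_ - start + 1
    let n := max 1 num_segments
    let base := PySem.Int.floordiv length n
    let rem := PySem.Int.mod length n
    let st := (PySem.List.pyRange 0 n 1).foldl
      (fun (acc : List (Int × Int) × Int) i =>
        let seg_len := base + (if i < rem then 1 else 0)
        if seg_len ≤ 0 then acc
        else (acc.1 ++ [(acc.2, acc.2 + seg_len - 1)], acc.2 + seg_len))
      ([], start)
    st.1

-- ===== PORT B =====
def split_span_equal_py_alt (start : Int) (end_ : Int) (num_segments : Int) : List (Int × Int) :=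
  if end_ < start then []
  else
    let length := end_ - start + 1
    let n := max 1 num_segments
    let base := PySem.Int.floordiv length n
    let rem := PySem.Int.mod length n
    let m := min n length
    (PySem.List.pyRange 0 m 1).map (fun i =>
      (start + i * base + min i rem, start + (i + 1) * base + min (i + 1) rem - 1))

-- ===== PRECONDITION & SPEC =====
def Spec_split_span_equal_py (start : Int) (end_ : Int) (num_segments : Int) (out : List (Int × Int)) : Prop := out = split_span_equal_py_alt start end_ num_segments
instance (start : Int) (end_ : Int) (num_segments : Int) (out : List (Int × Int)) : Decidable (Spec_split_span_equal_py start end_ num_segments out) := by unfold Spec_split_span_equal_py; infer_instance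

-- ===== CLAIM (what is proved, stated in full; the proofs are below) =====
def Claim_equal_split_span_equal_py : Prop := ∀ (start : Int) (end_ : Int) (num_segments : Int), Dom_split_span_equal_py start end_ num_segments → Spec_split_span_equal_py start end_ num_segments (split_span_equal_py start end_ num_segments)

-- ===== LEMMAS AND PROOFS =====

-- Loop invariant: after the first k iterations of A's loop the accumulated segment
-- list is B's map over the first min(k,m) cut points and the cursor sits at cut k.
lemma split_span_loop_inv (s base rem n m : Int)
    (hn : 1 ≤ n) (hb : 0 ≤ base) (hr : 0 ≤ rem) (hrn : rem < n)
    (hm : m = min n (n * base + rem)) :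
    ∀ k : Nat, (k : Int) ≤ n →
      (PySem.List.pyRange 0 (k : Int) 1).foldl
        (fun (acc : List (Int × Int) × Int) i =>
          let seg_len := base + (if i < rem then 1 else 0)
          if seg_len ≤ 0 then acc
          else (acc.1 ++ [(acc.2, acc.2 + seg_len - 1)], acc.2 + seg_len))
        ([], s)
      = ((PySem.List.pyRange 0 (min (k : Int) m) 1).map (fun i =>
            (s + i * base + min i rem, s + (i + 1) * base + min (i + 1) rem - 1)),
         s + (k : Int) * base + min (k : Int) rem) := by
  have hnb : 0 ≤ n * base := mul_nonneg (by omega) hb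
  intro k
  induction k with
  | zero =>
    intro _
    simp
    omega
  | succ k ih =>
    intro hk1
    have hk : (k : Int) ≤ n := by push_cast at hk1 ⊢; omega
    have hklt : (k : Int) < n := by push_cast at hk1 ⊢; omega
    have hrange : PySem.List.pyRange 0 ((k : Int) + 1) 1
        = PySem.List.pyRange 0 (k : Int) 1 ++ [(k : Int)] :=
      PySem.List.pyRange_one_succ_right (by positivity)
    push_cast
    rw [hrange, List.foldl_append, ih hk]
    simp only [List.foldl]
    by_cases hbig : base + (if (k : Int) < rem then 1 else 0) ≤ 0
    · -- skipped iteration: base = 0 and rem ≤ k, so nothing changes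
      have hb0 : base = 0 := by split_ifs at hbig <;> omega
      have hrk : rem ≤ (k : Int) := by
        by_contra h
        simp [hb0, if_pos (by omega : (k : Int) < rem)] at hbig
      have hmk : m ≤ (k : Int) := by rw [hb0] at hm; simp at hm; omega
      simp only [if_pos hbig]
      have h1 : min ((k : Int) + 1) m = min (k : Int) m := by omega
      have h2 : min ((k : Int) + 1) rem = min (k : Int) rem := by omega
      rw [h1, h2, hb0]
      simp
    · -- kept iteration: k+1 ≤ m, one segment appended, cursor moves to cut (k+1)
      have hkm : (k : Int) + 1 ≤ m := by
        rcases lt_or_ge (k : Int) rem with h | h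
        · omega
        · have hb1 : 1 ≤ base := by split_ifs at hbig <;> omega
          have : n ≤ n * base := le_mul_of_one_le_right (by omega) hb1
          omega
      have h1 : min ((k : Int) + 1) m = (k : Int) + 1 := by omega
      have h2 : min (k : Int) m = (k : Int) := by omega
      simp only [if_neg hbig]
      rcases lt_or_ge (k : Int) rem with h | h
      · have e1 : min (k : Int) rem = (k : Int) := by omega
        have e2 : min ((k : Int) + 1) rem = (k : Int) + 1 := by omega
        simp only [h1, h2, hrange, List.map_append, List.map_cons,
          List.map_nil, if_pos h, e1, e2, Prod.mk.injEq]
        refine ⟨?_, by ring⟩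
        congr 1
        simp only [List.cons.injEq, Prod.mk.injEq, and_true]
        constructor <;> first | trivial | ring
      · have e1 : min (k : Int) rem = rem := by omega
        have e2 : min ((k : Int) + 1) rem = rem := by omega
        simp only [h1, h2, hrange, List.map_append, List.map_cons,
          List.map_nil, if_neg (by omega : ¬ (k : Int) < rem), e1, e2, Prod.mk.injEq]
        refine ⟨?_, by ring⟩
        congr 1
        simp only [List.cons.injEq, Prod.mk.injEq, and_true]
        constructor <;> first | trivial | ring

-- ===== VERDICT (by name: the statement is the Claim_ definition above) =====
theorem split_span_equal_py_spec : Claim_equal_split_span_equal_py := by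
  intro start end_ num_segments _
  unfold Spec_split_span_equal_py split_span_equal_py split_span_equal_py_alt
  by_cases hlt : end_ < start
  · simp [hlt]
  · simp only [if_neg hlt]
    set L := end_ - start + 1 with hL
    set n := max 1 num_segments with hn
    have hn1 : 1 ≤ n := le_max_left _ _
    have hL1 : 1 ≤ L := by omega
    set base := PySem.Int.floordiv L n with hbase
    set rem := PySem.Int.mod L n with hrem
    have hid : base * n + rem = L := PySem.Int.floordiv_mul_add_mod L n
    have hr0 : 0 ≤ rem := PySem.Int.mod_nonneg L (by omega)
    have hrn : rem < n := PySem.Int.mod_lt L (by omega)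
    have hb0 : 0 ≤ base := by
      rw [hbase, PySem.Int.floordiv_eq_ediv_of_pos (by omega)]
      exact Int.ediv_nonneg (by omega) (by omega)
    have hmeq : min n L = min n (n * base + rem) := by rw [mul_comm, hid]
    have := split_span_loop_inv start base rem n (min n L) hn1 hb0 hr0 hrn hmeq
      n.toNat (by omega)
    rw [Int.toNat_of_nonneg (by omega : (0:Int) ≤ n)] at this
    rw [this, show min n (min n L) = min n L from by omega]
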